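-- pv_equiv track=rewrite | github.com/tlennon-ie/comfyui-model-compare | hierarchy_builder.py | calculate_col_header_spans
-- ===== SOURCE A (Python) =====
-- from typing import List, Dict, Any, Tuple, Optional, Set
--
-- def calculate_col_header_spans(
--     col_paths: List[Tuple],
--     col_hierarchy: List[str],
-- ) -> Dict[Tuple, Dict[int, int]]:
--     """
--     Calculate span for each column header cell.
--
--     Similar to row spans but for columns.
--     """
--     spans = {}
--
--     for idx, path in enumerate(col_paths):
--         spans[path] = {}
--
--         for level in range(len(col_hierarchy)):
--             # Count columns ahead with same value at this level
--             span = 1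
--             for next_idx in range(idx + 1, len(col_paths)):
--                 next_path = col_paths[next_idx]
--                 if level < len(next_path) and level < len(path):
--                     if next_path[level] == path[level]:
--                         span += 1
--                     else:
--                         break
--
--             spans[path][level] = span
--
--     return spans
-- ===== SOURCE B (Python) =====
-- def calculate_col_header_spans(col_paths, col_hierarchy):
--     n = len(col_paths)
--     L = len(col_hierarchy)
--     # One backward pass per level: for each column, span = 1 + number of later
--     # columns with the same defined value at this level, up to the first
--     # defined-but-different one (undefined columns are skipped, as in the spec).
--     level_spans = []
--     for level in range(L):
--         spans_lv = [1] * n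
--         nxt = None  # (value, count) at the nearest following column defined at this level
--         for idx in range(n - 1, -1, -1):
--             path = col_paths[idx]
--             if level < len(path):
--                 v = path[level]
--                 c = nxt[1] + 1 if nxt is not None and nxt[0] == v else 0
--                 spans_lv[idx] = c + 1
--                 nxt = (v, c)
--         level_spans.append(spans_lv)
--     spans = {}
--     for idx, path in enumerate(col_paths):
--         spans[path] = {level: level_spans[level][idx] for level in range(L)}
--     return spans
-- ===== Notes on version B (the rewrite author's own statement) =====
-- stated objective: faster
-- what changed: Replaces A's per-column forward rescan of all later columns (for every column and level) by one backward pass per hierarchy level that carries the (value, run-count) of the nearest following defined column, so each span is computed in O(1).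
import Mathlib
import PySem

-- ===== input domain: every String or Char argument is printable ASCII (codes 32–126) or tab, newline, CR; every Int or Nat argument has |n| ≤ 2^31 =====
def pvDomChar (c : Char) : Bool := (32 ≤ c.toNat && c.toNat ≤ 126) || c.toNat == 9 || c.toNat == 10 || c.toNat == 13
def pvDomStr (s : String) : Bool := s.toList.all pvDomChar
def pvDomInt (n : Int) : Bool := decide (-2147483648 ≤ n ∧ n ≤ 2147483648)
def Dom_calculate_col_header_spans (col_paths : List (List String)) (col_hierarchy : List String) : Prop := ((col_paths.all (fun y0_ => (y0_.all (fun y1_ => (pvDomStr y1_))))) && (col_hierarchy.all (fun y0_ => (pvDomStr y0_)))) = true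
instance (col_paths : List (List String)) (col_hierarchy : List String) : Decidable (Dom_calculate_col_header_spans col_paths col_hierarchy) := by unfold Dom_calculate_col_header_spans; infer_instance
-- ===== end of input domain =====

-- B replaces A's per-column forward rescan (per level) with one backward run-length pass per level; return values proved equal.

-- ===== PORT A =====
-- A's inner 'for next_idx in range(idx+1, n): … break' loop over the columns after idx
-- (getD is exact: it is only read under the 'level < length' guard, matching Python's in-range indexing)
def spanLoopA (path : List String) (level : Nat) : List (List String) → Int → Int
  | [], span => span
  | np :: rest, span =>
    if level < np.length ∧ level < path.length then
      if np.getD level "" = path.getD level "" then spanLoopA path level rest (span + 1)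
      else span
    else spanLoopA path level rest span

-- A's 'for level in range(len(col_hierarchy)): spans[path][level] = span' loop
def innerA (L : Nat) (path : List String) (tail : List (List String)) : PySem.Dict Int Int :=
  (List.range L).foldl (fun d (level : Nat) => d.insert (level : Int) (spanLoopA path level tail 1)) PySem.Dict.empty

-- A's outer 'for idx, path in enumerate(col_paths)' loop; at index idx the columns
-- col_paths[idx+1:] scanned by the inner loop are exactly the remaining tail.
def goA (L : Nat) (spans : PySem.Dict (List String) (PySem.Dict Int Int)) : List (List String) → PySem.Dict (List String) (PySem.Dict Int Int)
  | [] => spans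
  | path :: rest => goA L (spans.insert path (innerA L path rest)) rest

def calculate_col_header_spans (col_paths : List (List String)) (col_hierarchy : List String) : List (List String × List (Int × Int)) :=
  (goA col_hierarchy.length PySem.Dict.empty col_paths).items.map (fun p => (p.1, p.2.items))

-- ===== PORT B =====
-- B's backward pass for one level: returns (span per column at this level, (value, count) at the
-- nearest column defined at this level).  Structural recursion processes the tail (the later
-- columns) first — exactly Source B's 'for idx in range(n-1, -1, -1)'.
def colCnt (level : Nat) : List (List String) → List Int × Option (String × Int)
  | [] => ([], none)
  | p :: rest =>
    let r := colCnt level rest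
    if level < p.length then
      let v := p.getD level ""
      let c : Int := match r.2 with
        | some (nv, nc) => if nv = v then nc + 1 else 0
        | none => 0
      ((c + 1) :: r.1, some (v, c))
    else ((1 : Int) :: r.1, r.2)

def calculate_col_header_spans_alt (col_paths : List (List String)) (col_hierarchy : List String) : List (List String × List (Int × Int)) :=
  let L := col_hierarchy.length
  let levelSpans : List (List Int) := (List.range L).map (fun level => (colCnt level col_paths).1)
  -- Source B's final loop: spans[path] = {level: level_spans[level][idx] for level in range(L)}
  -- (enumerate indices are nonnegative, so .toNat is exact)
  let d := (PySem.List.enumerate col_paths).foldl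
    (fun spans p =>
      spans.insert p.2 (PySem.Dict.mk ((List.range L).map
        (fun (level : Nat) => ((level : Int), (levelSpans.getD level []).getD p.1.toNat 1)))))
    PySem.Dict.empty
  d.items.map (fun p => (p.1, p.2.items))

-- ===== PRECONDITION & SPEC =====
def Spec_calculate_col_header_spans (col_paths : List (List String)) (col_hierarchy : List String) (out : List (List String × List (Int × Int))) : Prop := out = calculate_col_header_spans_alt col_paths col_hierarchy
instance (col_paths : List (List String)) (col_hierarchy : List String) (out : List (List String × List (Int × Int))) : Decidable (Spec_calculate_col_header_spans col_paths col_hierarchy out) := by unfold Spec_calculate_col_header_spans; infer_instance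

-- ===== CLAIM (what is proved, stated in full; the proofs are below) =====
def Claim_equal_calculate_col_header_spans : Prop := ∀ (col_paths : List (List String)) (col_hierarchy : List String), Dom_calculate_col_header_spans col_paths col_hierarchy → Spec_calculate_col_header_spans col_paths col_hierarchy (calculate_col_header_spans col_paths col_hierarchy)

-- ===== LEMMAS AND PROOFS =====

-- the increment A's scan contributes beyond the initial 1, phrased via B's (value, count) summary
def cdef (path : List String) (level : Nat) (nx : Option (String × Int)) : Int :=
  if level < path.length then
    match nx with
    | some (nv, nc) => if nv = path.getD level "" then nc + 1 else 0
    | none => 0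
  else 0

lemma cdef_congr {p q : List String} {level : Nat} (hp : level < p.length) (hq : level < q.length)
    (hv : p.getD level "" = q.getD level "") (nx : Option (String × Int)) :
    cdef p level nx = cdef q level nx := by
  simp only [cdef, if_pos hp, if_pos hq, hv]

lemma cdef_some {path : List String} {level : Nat} (h : level < path.length) (v : String) (c : Int) :
    cdef path level (some (v, c)) = if v = path.getD level "" then c + 1 else 0 := by
  simp only [cdef, if_pos h]

lemma cdef_none (path : List String) (level : Nat) : cdef path level none = 0 := by
  simp only [cdef, ite_self]

lemma cdef_of_not_lt {path : List String} {level : Nat} (h : ¬ level < path.length)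
    (nx : Option (String × Int)) : cdef path level nx = 0 := by
  simp only [cdef, if_neg h]

lemma colCnt_fst_cons (level : Nat) (p : List String) (rest : List (List String)) :
    (colCnt level (p :: rest)).1
      = (if level < p.length then cdef p level (colCnt level rest).2 + 1 else 1)
        :: (colCnt level rest).1 := by
  by_cases h : level < p.length
  · rw [if_pos h, colCnt]
    simp only [if_pos h, cdef]
  · rw [if_neg h, colCnt]
    simp only [if_neg h]

lemma colCnt_snd_cons (level : Nat) (p : List String) (rest : List (List String)) :
    (colCnt level (p :: rest)).2
      = (if level < p.length then some (p.getD level "", cdef p level (colCnt level rest).2)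
         else (colCnt level rest).2) := by
  by_cases h : level < p.length
  · rw [if_pos h, colCnt]
    simp only [if_pos h, cdef]
  · rw [if_neg h, colCnt]
    simp only [if_neg h]

lemma span_eq (path : List String) (level : Nat) :
    ∀ (rest : List (List String)) (s : Int),
      spanLoopA path level rest s = s + cdef path level (colCnt level rest).2 := by
  intro rest
  induction rest with
  | nil =>
    intro s
    rw [spanLoopA]
    show s = s + cdef path level (colCnt level []).2
    rw [colCnt, cdef_none]
    ring
  | cons np rest ih =>
    intro s
    rw [colCnt_snd_cons]
    by_cases h1 : level < np.length
    · rw [if_pos h1]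
      by_cases h2 : level < path.length
      · rw [cdef_some h2]
        by_cases h3 : np.getD level "" = path.getD level ""
        · rw [spanLoopA, if_pos ⟨h1, h2⟩, if_pos h3, ih, if_pos h3,
            ← cdef_congr h1 h2 h3 (colCnt level rest).2]
          ring
        · rw [spanLoopA, if_pos ⟨h1, h2⟩, if_neg h3, if_neg h3]
          ring
      · have hg : ¬ (level < np.length ∧ level < path.length) := fun hc => h2 hc.2
        rw [spanLoopA, if_neg hg, ih, cdef_of_not_lt h2, cdef_of_not_lt h2]
    · have hg : ¬ (level < np.length ∧ level < path.length) := fun hc => h1 hc.1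
      rw [if_neg h1, spanLoopA, if_neg hg, ih]

lemma getD_colCnt (level : Nat) :
    ∀ (ps : List (List String)) (idx : Nat), idx < ps.length →
      (colCnt level ps).1.getD idx 1
        = 1 + cdef (ps.getD idx []) level (colCnt level (ps.drop (idx + 1))).2 := by
  intro ps
  induction ps with
  | nil => intro idx h; simp at h
  | cons p rest ih =>
    intro idx h
    rw [colCnt_fst_cons]
    cases idx with
    | zero =>
      simp only [List.getD_cons_zero, List.drop_succ_cons, List.drop_zero]
      by_cases h1 : level < p.length
      · rw [if_pos h1]; ring
      · rw [if_neg h1, cdef_of_not_lt h1]; ring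
    | succ j =>
      have hj : j < rest.length := by simpa using h
      simp only [List.getD_cons_succ, List.drop_succ_cons]
      exact ih j hj

lemma innerA_eq (L : Nat) (path : List String) (tail : List (List String)) :
    innerA L path tail
      = PySem.Dict.mk ((List.range L).map (fun (level : Nat) => ((level : Int), spanLoopA path level tail 1))) := by
  apply PySem.Dict.ext
  rw [innerA]
  have h := PySem.Dict.items_foldl_insert_fresh (l := List.range L)
    (k := fun (a : Nat) => (a : Int)) (v := fun (level : Nat) => spanLoopA path level tail 1)
    (d := (PySem.Dict.empty : PySem.Dict Int Int)) (by intro a _; simp)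
    (List.Nodup.map (fun a b h => by exact_mod_cast h) (List.nodup_range))
  simpa using h

lemma inner_eq (cp : List (List String)) (L : Nat) (idx : Nat) (h : idx < cp.length) :
    innerA L (cp.getD idx []) (cp.drop (idx + 1))
      = PySem.Dict.mk ((List.range L).map (fun (level : Nat) =>
          ((level : Int),
            (((List.range L).map (fun (l : Nat) => (colCnt l cp).1)).getD level []).getD idx 1))) := by
  rw [innerA_eq]
  congr 1
  apply List.map_congr_left
  intro level hlevel
  have hL : level < L := List.mem_range.mp hlevel
  have hmap : ((List.range L).map (fun (l : Nat) => (colCnt l cp).1)).getD level []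
      = (colCnt level cp).1 := by
    rw [List.getD_eq_getElem?_getD]
    simp [List.getElem?_range hL]
  rw [hmap, span_eq, getD_colCnt level cp idx h]

lemma fold_eq (cp : List (List String)) (L : Nat) :
    ∀ (cp0 : List (List String)) (i : Nat), cp0 = cp.drop i →
      ∀ (spans : PySem.Dict (List String) (PySem.Dict Int Int)),
        goA L spans cp0
          = (PySem.List.enumerate cp0 ((i : Nat) : Int)).foldl
              (fun spans p =>
                spans.insert p.2 (PySem.Dict.mk ((List.range L).map
                  (fun (level : Nat) => ((level : Int),
                    (((List.range L).map (fun (l : Nat) => (colCnt l cp).1)).getD level []).getD p.1.toNat 1)))))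
              spans := by
  intro cp0
  induction cp0 with
  | nil => intro i _ spans; simp [goA, PySem.List.enumerate_nil]
  | cons path rest ih =>
    intro i h spans
    have hi : i < cp.length := by
      by_contra hn
      rw [List.drop_eq_nil_of_le (by omega)] at h
      exact List.cons_ne_nil _ _ h
    have hrest : rest = cp.drop (i + 1) := by
      have := congrArg (List.drop 1) h
      simpa [List.drop_drop, Nat.add_comm] using this
    have hpath : cp.getD i [] = path := by
      have h0 : (cp.drop i)[0]? = some path := by rw [← h]; simp
      rw [List.getElem?_drop] at h0
      simp only [Nat.add_zero] at h0
      simp [List.getD_eq_getElem?_getD, h0]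
    rw [goA, PySem.List.enumerate_cons, List.foldl_cons]
    have hcast : ((i : Nat) : Int) + 1 = (((i + 1 : Nat)) : Int) := by push_cast; ring
    rw [hcast, ← ih (i + 1) hrest]
    congr 1
    congr 1
    have hinner := inner_eq cp L i hi
    rw [hpath, ← hrest] at hinner
    rw [hinner]
    simp

-- ===== VERDICT (by name: the statement is the Claim_ definition above) =====
theorem calculate_col_header_spans_spec : Claim_equal_calculate_col_header_spans := by
  intro cp ch _
  unfold Spec_calculate_col_header_spans
  simp only [calculate_col_header_spans, calculate_col_header_spans_alt]
  have h := fold_eq cp ch.length cp 0 (by simp) PySem.Dict.empty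
  simp only [Nat.cast_zero] at h
  rw [h]
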